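-- pv_equiv track=rewrite | github.com/solonsrs94-blip/financial-workbench | lib/data/providers/edgar_quarterly.py | _dedup_stock
-- ===== SOURCE A (Python) =====
-- from collections import defaultdict
--
-- def _dedup_stock(facts: list) -> list:
--     """Stock items: all 10-Q/10-K entries, dedup by end date."""
--     by_end: dict = defaultdict(list)
--     for f in facts:
--         if f.get("form") not in ("10-Q", "10-K"):
--             continue
--         by_end[f["end"]].append(f)
--     return [
--         max(v, key=lambda x: x.get("filed", ""))
--         for v in by_end.values()
--     ]
-- ===== SOURCE B (Python) =====
-- def _dedup_stock(facts: list) -> list: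
--     """Stock items: all 10-Q/10-K entries, dedup by end date, keeping the
--     first fact with the greatest 'filed' for each end date."""
--     best: dict = {}
--     for f in facts:
--         if f.get("form") not in ("10-Q", "10-K"):
--             continue
--         end = f["end"]
--         cur = best.get(end)
--         if cur is None or cur.get("filed", "") < f.get("filed", ""):
--             best[end] = f
--     return list(best.values())
-- ===== Notes on version B (the rewrite author's own statement) =====
-- stated objective: simpler
-- what changed: Replaces the group-into-lists-then-max-per-group(defaultdict of lists + a max() reduction pass) with a single pass keeping one best fact per end date, replacing only on strictly greater 'filed' so ties keep the first-seen fact like max().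
import Mathlib
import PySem

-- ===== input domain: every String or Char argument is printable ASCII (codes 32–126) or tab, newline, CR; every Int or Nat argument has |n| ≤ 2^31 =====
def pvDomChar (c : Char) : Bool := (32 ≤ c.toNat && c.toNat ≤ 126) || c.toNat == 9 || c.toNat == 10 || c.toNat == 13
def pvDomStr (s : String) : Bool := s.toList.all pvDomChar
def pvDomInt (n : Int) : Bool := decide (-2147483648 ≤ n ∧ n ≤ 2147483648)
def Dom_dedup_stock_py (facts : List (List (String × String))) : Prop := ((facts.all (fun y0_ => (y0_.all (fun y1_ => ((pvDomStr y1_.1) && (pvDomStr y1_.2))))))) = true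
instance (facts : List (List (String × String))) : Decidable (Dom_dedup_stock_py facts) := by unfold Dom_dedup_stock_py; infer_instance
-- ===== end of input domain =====

-- B replaces A's group-into-lists-then-max-per-group with a single pass keeping one best
-- fact per end date (replace only on strictly greater 'filed', so ties keep the first fact,
-- exactly like max()); objective: simpler.

-- shared line-for-line helpers: the guard `f.get("form") not in ("10-Q","10-K")`
-- and the key `x.get("filed", "")`, identical source text in A and B
def pvIsForm (fd : PySem.Dict String String) : Bool :=
  fd.get? "form" == some "10-Q" || fd.get? "form" == some "10-K"

def pvFiled (fd : PySem.Dict String String) : String :=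
  fd.getD "filed" ""

-- ===== PORT A =====
-- loop body of A: `by_end[f["end"]].append(f)` on a defaultdict(list);
-- the `none` branch of `get? "end"` is Python's KeyError, excluded by Pre_.
def pvStepA (d : PySem.Dict String (List (PySem.Dict String String)))
    (f : List (String × String)) : PySem.Dict String (List (PySem.Dict String String)) :=
  let fd := PySem.Dict.ofList f
  if pvIsForm fd then
    match fd.get? "end" with
    | some e => d.modify e [] (fun l => l ++ [fd])
    | none => d          -- KeyError in Python; outside Pre_
  else d

def dedup_stock_py (facts : List (List (String × String))) : List (List (String × String)) :=
  let byEnd := facts.foldl pvStepA PySem.Dict.empty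
  byEnd.values.map (fun v =>
    match PySem.List.max? v pvFiled with
    | some m => m.items
    | none => [])        -- max([]) would be ValueError; lists in by_end are never empty

-- ===== PORT B =====
-- loop body of B: keep one best fact per end date, replace on strictly greater 'filed'
def pvStepB (best : PySem.Dict String (PySem.Dict String String))
    (f : List (String × String)) : PySem.Dict String (PySem.Dict String String) :=
  let fd := PySem.Dict.ofList f
  if pvIsForm fd then
    match fd.get? "end" with
    | some e =>
      match best.get? e with
      | none => best.insert e fd
      | some cur => if pvFiled cur < pvFiled fd then best.insert e fd else best
    | none => best       -- KeyError in Python; outside Pre_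
  else best

def dedup_stock_py_alt (facts : List (List (String × String))) : List (List (String × String)) :=
  ((facts.foldl pvStepB PySem.Dict.empty).values).map (fun fd => fd.items)

-- ===== PRECONDITION & SPEC =====
-- Pre_ excludes exactly the inputs where Python A raises KeyError: a 10-Q/10-K fact
-- without an "end" key (B raises there too).
def Pre_dedup_stock_py (facts : List (List (String × String))) : Prop :=
  ∀ f ∈ facts, pvIsForm (PySem.Dict.ofList f) = true →
    (PySem.Dict.ofList f).contains "end" = true
instance (facts : List (List (String × String))) : Decidable (Pre_dedup_stock_py facts) := by
  unfold Pre_dedup_stock_py; infer_instance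

def pvWitness_dedup_stock_py : (List (List (String × String))) :=
  [[("form", "10-K"), ("end", "2020-12-31"), ("filed", "2021-01-01")],
   [("form", "10-Q"), ("end", "2020-12-31"), ("filed", "2021-02-01")]]

def Spec_dedup_stock_py (facts : List (List (String × String))) (out : List (List (String × String))) : Prop := out = dedup_stock_py_alt facts
instance (facts : List (List (String × String))) (out : List (List (String × String))) : Decidable (Spec_dedup_stock_py facts out) := by unfold Spec_dedup_stock_py; infer_instance

-- ===== CLAIM (what is proved, stated in full; the proofs are below) =====
def Claim_equal_dedup_stock_py : Prop := ∀ (facts : List (List (String × String))), Dom_dedup_stock_py facts → Pre_dedup_stock_py facts → Spec_dedup_stock_py facts (dedup_stock_py facts)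

-- ===== LEMMAS AND PROOFS =====

-- the per-group reduction A applies: first maximum by 'filed'
def pvMx (l : List (PySem.Dict String String)) : PySem.Dict String String :=
  (PySem.List.max? l pvFiled).getD PySem.Dict.empty

-- the entrywise relation between A's grouping dict and B's best dict
def pvG (p : String × List (PySem.Dict String String)) : String × PySem.Dict String String :=
  (p.1, pvMx p.2)

theorem pvGetMap (d : PySem.Dict String (List (PySem.Dict String String)))
    (b : PySem.Dict String (PySem.Dict String String))
    (hb : b.items = d.items.map pvG) (k : String) :
    b.get? k = (d.get? k).map pvMx := by
  simp only [PySem.Dict.get?, hb, List.find?_map, Option.map_map]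
  rfl

theorem pvMxAppend (l : List (PySem.Dict String String)) (m x : PySem.Dict String String)
    (h : PySem.List.max? l pvFiled = some m) :
    pvMx (l ++ [x]) = if pvFiled m < pvFiled x then x else m := by
  simp only [pvMx, PySem.List.max?, List.foldl_append] at *
  rw [h]
  simp only [List.foldl]
  split_ifs <;> rfl

theorem pvStepInv (f : List (String × String))
    (d : PySem.Dict String (List (PySem.Dict String String)))
    (b : PySem.Dict String (PySem.Dict String String))
    (hk : d.keys.Nodup) (hne : ∀ p ∈ d.items, p.2 ≠ []) (hb : b.items = d.items.map pvG) :
    (pvStepA d f).keys.Nodup ∧ (∀ p ∈ (pvStepA d f).items, p.2 ≠ []) ∧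
      (pvStepB b f).items = (pvStepA d f).items.map pvG := by
  unfold pvStepA pvStepB
  by_cases hform : pvIsForm (PySem.Dict.ofList f) = true
  · simp only [hform, if_pos]
    cases hend : (PySem.Dict.ofList f).get? "end" with
    | none => exact ⟨hk, hne, hb⟩
    | some e =>
      dsimp only
      have hget := pvGetMap d b hb e
      by_cases hc : d.contains e = true
      · -- key already present: A appends to the group, B compares 'filed'
        have hsome : ∃ l, d.get? e = some l := by
          rw [PySem.Dict.contains_eq_isSome_get?] at hc
          exact Option.isSome_iff_exists.mp hc
        obtain ⟨l, hl⟩ := hsome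
        have hlne : l ≠ [] := hne _ (PySem.Dict.mem_items_of_get?_eq_some d hl)
        have hmx : ∃ m, PySem.List.max? l pvFiled = some m := by
          cases hm : PySem.List.max? l pvFiled with
          | none => exact absurd ((PySem.List.max?_eq_none_iff _ _).mp hm) hlne
          | some m => exact ⟨m, rfl⟩
        obtain ⟨m, hm⟩ := hmx
        have hmxl : pvMx l = m := by simp [pvMx, hm]
        have hbc : b.contains e = true := by
          rw [PySem.Dict.contains_eq_isSome_get?, hget, hl]; rfl
        have hgd : d.getD e [] = l := PySem.Dict.getD_of_get?_eq_some d [] hl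
        rw [hget, hl]
        simp only [Option.map_some, hmxl]
        refine ⟨?_, ?_, ?_⟩
        · simp only [PySem.Dict.modify, hgd]
          exact PySem.Dict.nodup_keys_insert _ _ _ hk
        · intro p hp
          simp only [PySem.Dict.modify, hgd, PySem.Dict.mem_items_insert] at hp
          rcases hp with h1 | h2
          · subst h1; simp
          · exact hne _ h2.1
        · simp only [PySem.Dict.modify, hgd,
            PySem.Dict.items_insert_of_contains d _ hc]
          by_cases hlt : pvFiled m < pvFiled (PySem.Dict.ofList f)
          · -- B replaces: both sides rewrite the entry at key e
            simp only [if_pos hlt,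
              PySem.Dict.items_insert_of_contains b _ hbc, hb,
              List.map_map]
            apply List.map_congr_left
            intro p _
            by_cases hpe : (p.1 == e) = true
            · have hpe' : p.1 = e := by simpa using hpe
              simp [pvG, hpe', pvMxAppend l m _ hm, hlt]
            · have hpe' : p.1 ≠ e := by simpa using hpe
              simp [pvG, hpe']
          · -- B keeps: A's new max equals the old one on every entry
            simp only [if_neg hlt, hb, List.map_map]
            symm
            apply List.map_congr_left
            intro p hp
            by_cases hpe : (p.1 == e) = true
            · have hpe' : p.1 = e := by simpa using hpe
              have hpv : d.get? p.1 = some p.2 := PySem.Dict.get?_of_mem_items d hp hk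
              rw [hpe', hl] at hpv
              have hpl : l = p.2 := Option.some.inj hpv
              simp [pvG, hpe', ← hpl, pvMxAppend l m _ hm, hlt, hmxl]
            · have hpe' : p.1 ≠ e := by simpa using hpe
              simp [pvG, hpe']
      · -- fresh key: both append a new entry
        have hc' : d.contains e = false := by simpa using hc
        have hdn : d.get? e = none := by
          cases h : d.get? e with
          | none => rfl
          | some v => rw [PySem.Dict.contains_eq_isSome_get?, h] at hc'; simp at hc'
        rw [hget, hdn]
        simp only [Option.map_none]
        refine ⟨?_, ?_, ?_⟩
        · simp only [PySem.Dict.modify]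
          exact PySem.Dict.nodup_keys_insert _ _ _ hk
        · intro p hp
          simp only [PySem.Dict.modify, PySem.Dict.getD_of_not_contains d _ hc',
            PySem.Dict.mem_items_insert] at hp
          rcases hp with h1 | h2
          · subst h1; simp
          · exact hne _ h2.1
        · have hbc : b.contains e = false := by
            rw [PySem.Dict.contains_eq_isSome_get?, hget, hdn]; rfl
          simp only [PySem.Dict.modify, PySem.Dict.getD_of_not_contains d _ hc',
            PySem.Dict.items_insert_of_not_contains d _ hc',
            PySem.Dict.items_insert_of_not_contains b _ hbc, hb,
            List.map_append]
          rfl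
  · simp only [hform]
    exact ⟨hk, hne, hb⟩

theorem pvFoldInv (facts : List (List (String × String)))
    (d : PySem.Dict String (List (PySem.Dict String String)))
    (b : PySem.Dict String (PySem.Dict String String))
    (hk : d.keys.Nodup) (hne : ∀ p ∈ d.items, p.2 ≠ []) (hb : b.items = d.items.map pvG) :
    (facts.foldl pvStepA d).keys.Nodup ∧
      (∀ p ∈ (facts.foldl pvStepA d).items, p.2 ≠ []) ∧
      (facts.foldl pvStepB b).items = (facts.foldl pvStepA d).items.map pvG := by
  induction facts generalizing d b with
  | nil => exact ⟨hk, hne, hb⟩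
  | cons f rest ih =>
    obtain ⟨hk', hne', hb'⟩ := pvStepInv f d b hk hne hb
    exact ih _ _ hk' hne' hb'

-- ===== VERDICT (by name: the statement is the Claim_ definition above) =====
theorem dedup_stock_py_spec : Claim_equal_dedup_stock_py := by
  intro facts _ _
  unfold Spec_dedup_stock_py dedup_stock_py dedup_stock_py_alt
  obtain ⟨_, hne, hb⟩ := pvFoldInv facts PySem.Dict.empty PySem.Dict.empty
    (by simp) (by simp [PySem.Dict.empty]) (by simp [PySem.Dict.empty])
  simp only [PySem.Dict.values, hb, List.map_map]
  apply List.map_congr_left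
  intro p hp
  have hpne : p.2 ≠ [] := hne p hp
  cases hm : PySem.List.max? p.2 pvFiled with
  | none => exact absurd ((PySem.List.max?_eq_none_iff _ _).mp hm) hpne
  | some m => simp [pvG, pvMx, hm]
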